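-- pv_equiv track=rewrite | github.com/wdbhrg/Hegelian-dialectics | hegel_engine.py | _truncate_chunks
-- ===== SOURCE A (Python) =====
-- from typing import Dict, Generator, List, Optional
--
-- def _truncate_chunks(
--     chunks: List[Dict[str, str]],
--     max_chunks: int,
--     max_chars_per_chunk: int,
--     max_total_chars: int,
-- ) -> List[Dict[str, str]]:
--     selected: List[Dict[str, str]] = []
--     total = 0
--     for ch in chunks[:max_chunks]:
--         text = str(ch.get("text", ""))
--         if len(text) > max_chars_per_chunk:
--             text = text[:max_chars_per_chunk]
--         if total + len(text) > max_total_chars: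
--             break
--         item = dict(ch)
--         item["text"] = text
--         selected.append(item)
--         total += len(text)
--     return selected
-- ===== SOURCE B (Python) =====
-- def _truncate_chunks(
--     chunks,
--     max_chunks,
--     max_chars_per_chunk,
--     max_total_chars,
-- ):
--     # Pass 1: truncate every candidate chunk up front.
--     def shrink(ch):
--         text = str(ch.get("text", ""))
--         if len(text) > max_chars_per_chunk:
--             text = text[:max_chars_per_chunk]
--         return {**ch, "text": text}
--
--     truncated = [shrink(ch) for ch in chunks[:max_chunks]]
--     # Pass 2: running prefix sum of the (monotone, non-negative) truncated
--     # lengths; cut before the first item whose cumulative total overflows.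
--     cut = len(truncated)
--     total = 0
--     for i, item in enumerate(truncated):
--         total += len(item["text"])
--         if total > max_total_chars:
--             cut = i
--             break
--     return truncated[:cut]
-- ===== Notes on version B (the rewrite author's own statement) =====
-- stated objective: alternative
-- what changed: B splits A's single fused loop into two phases: a map that truncates every candidate chunk in chunks[:max_chunks] up front, then a prefix-sum scan over the truncated lengths that finds the cut index before the first cumulative overflow, returning a slice of the precomputed list.
import Mathlib
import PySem

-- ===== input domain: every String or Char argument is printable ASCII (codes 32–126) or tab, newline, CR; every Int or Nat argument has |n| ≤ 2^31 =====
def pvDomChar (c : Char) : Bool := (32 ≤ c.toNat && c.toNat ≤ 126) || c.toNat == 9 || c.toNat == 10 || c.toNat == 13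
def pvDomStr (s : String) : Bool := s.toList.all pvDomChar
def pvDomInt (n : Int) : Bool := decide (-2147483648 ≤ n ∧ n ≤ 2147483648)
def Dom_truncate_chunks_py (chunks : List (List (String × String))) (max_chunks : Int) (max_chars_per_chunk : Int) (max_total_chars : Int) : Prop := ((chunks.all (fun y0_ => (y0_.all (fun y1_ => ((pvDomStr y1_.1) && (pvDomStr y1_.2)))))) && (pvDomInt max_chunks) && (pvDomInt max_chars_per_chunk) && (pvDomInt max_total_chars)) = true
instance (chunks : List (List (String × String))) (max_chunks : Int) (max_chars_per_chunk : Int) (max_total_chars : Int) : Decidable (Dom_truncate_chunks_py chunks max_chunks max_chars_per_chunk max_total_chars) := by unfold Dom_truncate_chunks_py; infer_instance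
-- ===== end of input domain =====

-- B replaces A's fused loop by map-then-prefix-sum-then-slice; same structure in the ports; equal return values proved.

-- ===== PORT A =====
-- the loop body of A: total is the running character total; break returns the accumulated prefix
def pvGoA (mpc mtc : Int) : List (List (String × String)) → Int → List (List (String × String))
  | [], _ => []
  | ch :: rest, total =>
    let text := (PySem.Dict.mk ch).getD "text" ""          -- str(ch.get("text", ""))
    let text := if PySem.Str.len text > mpc then PySem.Str.slice text none (some mpc) else text
    if total + PySem.Str.len text > mtc then []            -- break
    else ((PySem.Dict.mk ch).insert "text" text).items ::  -- item = dict(ch); item["text"] = text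
         pvGoA mpc mtc rest (total + PySem.Str.len text)

def truncate_chunks_py (chunks : List (List (String × String))) (max_chunks : Int) (max_chars_per_chunk : Int) (max_total_chars : Int) : List (List (String × String)) :=
  pvGoA max_chars_per_chunk max_total_chars (PySem.List.slice chunks none (some max_chunks)) 0

-- ===== PORT B =====
-- B's shrink(ch): truncate the text and rebuild the dict ({**ch, "text": text})
def pvShrink (mpc : Int) (ch : List (String × String)) : List (String × String) :=
  let text := (PySem.Dict.mk ch).getD "text" ""
  let text := if PySem.Str.len text > mpc then PySem.Str.slice text none (some mpc) else text
  ((PySem.Dict.mk ch).insert "text" text).items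

-- B's cut loop: number of leading items whose cumulative text length stays ≤ mtc
-- (item["text"] cannot raise: shrink always stores a "text" key, so getD is exact here)
def pvCut (mtc : Int) : List (List (String × String)) → Int → Nat
  | [], _ => 0
  | item :: rest, total =>
    let total := total + PySem.Str.len ((PySem.Dict.mk item).getD "text" "")
    if total > mtc then 0 else pvCut mtc rest total + 1

def truncate_chunks_py_alt (chunks : List (List (String × String))) (max_chunks : Int) (max_chars_per_chunk : Int) (max_total_chars : Int) : List (List (String × String)) :=
  let truncated := (PySem.List.slice chunks none (some max_chunks)).map (pvShrink max_chars_per_chunk)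
  truncated.take (pvCut max_total_chars truncated 0)

-- ===== PRECONDITION & SPEC =====
def Spec_truncate_chunks_py (chunks : List (List (String × String))) (max_chunks : Int) (max_chars_per_chunk : Int) (max_total_chars : Int) (out : List (List (String × String))) : Prop := out = truncate_chunks_py_alt chunks max_chunks max_chars_per_chunk max_total_chars
instance (chunks : List (List (String × String))) (max_chunks : Int) (max_chars_per_chunk : Int) (max_total_chars : Int) (out : List (List (String × String))) : Decidable (Spec_truncate_chunks_py chunks max_chunks max_chars_per_chunk max_total_chars out) := by unfold Spec_truncate_chunks_py; infer_instance

-- ===== CLAIM (what is proved, stated in full; the proofs are below) =====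
def Claim_equal_truncate_chunks_py : Prop := ∀ (chunks : List (List (String × String))) (max_chunks : Int) (max_chars_per_chunk : Int) (max_total_chars : Int), Dom_truncate_chunks_py chunks max_chunks max_chars_per_chunk max_total_chars → Spec_truncate_chunks_py chunks max_chunks max_chars_per_chunk max_total_chars (truncate_chunks_py chunks max_chunks max_chars_per_chunk max_total_chars)

-- ===== LEMMAS AND PROOFS =====

-- rebuilding a dict from its items is the identity (structure eta)
theorem pvMkItems {κ ν : Type} [BEq κ] (d : PySem.Dict κ ν) : PySem.Dict.mk d.items = d := rfl

-- A's fused loop equals B's map-then-cut-then-take, for every running total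
theorem pvGoA_eq (mpc mtc : Int) (l : List (List (String × String))) (total : Int) :
    pvGoA mpc mtc l total =
      (l.map (pvShrink mpc)).take (pvCut mtc (l.map (pvShrink mpc)) total) := by
  induction l generalizing total with
  | nil => simp [pvGoA, pvCut]
  | cons ch rest ih =>
    simp only [pvGoA, List.map_cons, pvCut, pvShrink, pvMkItems, PySem.Dict.getD_insert_self]
    split_ifs <;> simp [List.take_succ_cons, ih]

-- ===== VERDICT (by name: the statement is the Claim_ definition above) =====
theorem truncate_chunks_py_spec : Claim_equal_truncate_chunks_py := by
  intro chunks mc mpc mtc _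
  unfold Spec_truncate_chunks_py truncate_chunks_py truncate_chunks_py_alt
  exact pvGoA_eq mpc mtc _ 0
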